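-- pv_equiv track=rewrite | github.com/jmillanacosta/rdfsolve | src/rdfsolve/qlever/_core.py | detect_data_format
-- ===== SOURCE A (Python) =====
-- from typing import Any
--
-- def detect_data_format(entry: Any) -> str | None:
--     """Return format string if the entry has any download field or local_tar_url.
--
--     Returns ``None`` when the entry has neither ``download_*`` fields
--     nor a ``local_tar_url``.
--     """
--     if entry.get("local_tar_url"):
--         return "trig"
--     dl_keys = [k for k in entry if k.startswith("download_") and entry.get(k)]
--     if not dl_keys:
--         return None
--     priority = [
--         "download_nq", "download_nquads", "download_trig", "download_nt",
--         "download_n3", "download_ttl", "download_rdf", "download_rdfxml",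
--         "download_owl", "download_obo", "download_jsonld", "download_zip",
--         "download_tar_gz", "download_tgz", "download_ftp",
--     ]
--     for k in priority:
--         if k in dl_keys:
--             return k.removeprefix("download_")
--     return dl_keys[0].removeprefix("download_")
-- ===== SOURCE B (Python) =====
-- _PRIORITY = [
--     "download_nq", "download_nquads", "download_trig", "download_nt",
--     "download_n3", "download_ttl", "download_rdf", "download_rdfxml",
--     "download_owl", "download_obo", "download_jsonld", "download_zip",
--     "download_tar_gz", "download_tgz", "download_ftp",
-- ]
-- _RANK = {k: i for i, k in enumerate(_PRIORITY)}
--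
--
-- def detect_data_format(entry):
--     """Return format string if the entry has any download field or local_tar_url."""
--     if entry.get("local_tar_url"):
--         return "trig"
--     big = len(_PRIORITY)
--     best = None
--     best_rank = big + 1
--     for k in entry:
--         if k.startswith("download_") and entry.get(k):
--             r = _RANK.get(k, big)
--             if r < best_rank:
--                 best = k
--                 best_rank = r
--     return None if best is None else best.removeprefix("download_")
-- ===== Notes on version B (the rewrite author's own statement) =====
-- stated objective: alternative
-- what changed: Replaces A's materialised dl_keys list plus a second scan over the 15-element priority list (with a list membership test per element) by a precomputed rank dictionary and a single stable min-by-rank pass over the entry keys with a sentinel rank for non-priority keys.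
import Mathlib
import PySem

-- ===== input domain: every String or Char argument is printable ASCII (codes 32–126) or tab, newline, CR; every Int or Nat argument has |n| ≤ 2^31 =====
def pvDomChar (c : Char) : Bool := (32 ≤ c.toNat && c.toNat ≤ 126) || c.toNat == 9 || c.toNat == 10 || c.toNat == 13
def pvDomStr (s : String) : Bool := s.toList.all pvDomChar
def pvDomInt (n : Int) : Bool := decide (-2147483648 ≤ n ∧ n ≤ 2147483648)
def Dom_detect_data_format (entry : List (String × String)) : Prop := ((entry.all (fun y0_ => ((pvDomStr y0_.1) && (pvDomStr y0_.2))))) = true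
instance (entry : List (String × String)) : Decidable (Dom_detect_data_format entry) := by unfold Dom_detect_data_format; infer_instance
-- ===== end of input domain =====

-- B replaces A's dl_keys list + second scan over the priority list by a rank dictionary and a
-- single stable min-by-rank pass over the entry keys (objective: alternative, same cost class).

-- shared primitives: entry.get(k) (first match), str truthiness, str.removeprefix (exact on all strings)
def pvGet (entry : List (String × String)) (k : String) : Option String :=
  (entry.find? (fun p => p.1 == k)).map (·.2)

def pvTruthy (o : Option String) : Bool :=
  match o with
  | some s => !(s == "")
  | none => false

def pvRemovePrefix (s pre : String) : String :=
  if PySem.Str.startswith s pre then String.ofList (s.toList.drop pre.toList.length) else s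

-- ===== PORT A =====
def detect_data_format (entry : List (String × String)) : Option String :=
  if pvTruthy (pvGet entry "local_tar_url") then some "trig"
  else
    let dl_keys := (entry.map (·.1)).filter
      (fun k => PySem.Str.startswith k "download_" && pvTruthy (pvGet entry k))
    if dl_keys.isEmpty then none
    else
      let priority := ["download_nq", "download_nquads", "download_trig", "download_nt",
        "download_n3", "download_ttl", "download_rdf", "download_rdfxml",
        "download_owl", "download_obo", "download_jsonld", "download_zip",
        "download_tar_gz", "download_tgz", "download_ftp"]
      match priority.find? (fun k => dl_keys.contains k) with
      | some k => some (pvRemovePrefix k "download_")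
      | none => some (pvRemovePrefix (dl_keys.headD "") "download_")

-- ===== PORT B =====
def pvPriority : List String :=
  ["download_nq", "download_nquads", "download_trig", "download_nt",
   "download_n3", "download_ttl", "download_rdf", "download_rdfxml",
   "download_owl", "download_obo", "download_jsonld", "download_zip",
   "download_tar_gz", "download_tgz", "download_ftp"]

-- _RANK = {k: i for i, k in enumerate(_PRIORITY)}
def pvRank : PySem.Dict String Int :=
  PySem.Dict.ofList ((PySem.List.enumerate pvPriority).map (fun p => (p.2, p.1)))

def detect_data_format_alt (entry : List (String × String)) : Option String :=
  if pvTruthy (pvGet entry "local_tar_url") then some "trig"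
  else
    let big : Int := (pvPriority.length : Int)
    let st := entry.foldl
      (fun (st : Option String × Int) p =>
        if PySem.Str.startswith p.1 "download_" && pvTruthy (pvGet entry p.1) then
          let r := pvRank.getD p.1 big
          if r < st.2 then (some p.1, r) else st
        else st)
      ((none : Option String), big + 1)
    match st.1 with
    | none => none
    | some b => some (pvRemovePrefix b "download_")

-- ===== PRECONDITION & SPEC =====
def Spec_detect_data_format (entry : List (String × String)) (out : Option String) : Prop := out = detect_data_format_alt entry
instance (entry : List (String × String)) (out : Option String) : Decidable (Spec_detect_data_format entry out) := by unfold Spec_detect_data_format; infer_instance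

-- ===== CLAIM (what is proved, stated in full; the proofs are below) =====
def Claim_equal_detect_data_format : Prop := ∀ (entry : List (String × String)), Dom_detect_data_format entry → Spec_detect_data_format entry (detect_data_format entry)

-- ===== LEMMAS AND PROOFS =====

def pvRankOf (k : String) : Int := pvRank.getD k 15

def pvStep (st : Option String × Int) (k : String) : Option String × Int :=
  if pvRankOf k < st.2 then (some k, pvRankOf k) else st

-- first-strict-improvement selector: what B's running (best, best_rank) pair computes
def pvFm : List String → Int → Option String
  | [], _ => none
  | k :: l, c => if pvRankOf k < c then some ((pvFm l (pvRankOf k)).getD k) else pvFm l c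

theorem pv_fold_filter {α β : Type} (q : α → Bool) (u : β → α → β) :
    ∀ (l : List α) (st : β),
      l.foldl (fun st x => if q x then u st x else st) st = (l.filter q).foldl u st := by
  intro l
  induction l with
  | nil => intro st; rfl
  | cons x l ih =>
    intro st
    by_cases h : q x = true <;> simp [h, ih]

theorem pv_foldl_step_eq_fm :
    ∀ (l : List String) (b : Option String) (c : Int),
      (l.foldl pvStep (b, c)).1 = (pvFm l c).elim b some := by
  intro l
  induction l with
  | nil => intro b c; rfl
  | cons k l ih =>
    intro b c
    by_cases h : pvRankOf k < c
    · simp only [List.foldl_cons, pvStep, pvFm, if_pos h, ih]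
      cases pvFm l (pvRankOf k) <;> rfl
    · simp only [List.foldl_cons, pvStep, pvFm, if_neg h, ih]

theorem pv_fm_none : ∀ (l : List String) (c : Int), (∀ k ∈ l, ¬ pvRankOf k < c) → pvFm l c = none := by
  intro l
  induction l with
  | nil => intro c _; rfl
  | cons k l ih =>
    intro c h
    simp only [pvFm, if_neg (h k (by simp))]
    exact ih c (fun j hj => h j (by simp [hj]))

theorem pv_fm_head (l : List String) (h : ∀ k ∈ l, pvRankOf k = 15) : pvFm l 16 = l.head? := by
  cases l with
  | nil => rfl
  | cons k l =>
    have hk : pvRankOf k = 15 := h k (by simp)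
    simp only [pvFm, hk, if_pos (by omega : (15:Int) < 16)]
    rw [pv_fm_none l 15 (fun j hj => by rw [h j (by simp [hj])]; omega)]
    rfl

theorem pv_fm_first_min :
    ∀ (l : List String) (c m : Int) (k₀ : String),
      m < c → k₀ ∈ l → pvRankOf k₀ = m →
      (∀ k ∈ l, m ≤ pvRankOf k) → (∀ k ∈ l, pvRankOf k = m → k = k₀) →
      pvFm l c = some k₀ := by
  intro l
  induction l with
  | nil => intro c m k₀ _ h; cases h
  | cons k l ih =>
    intro c m k₀ hmc hmem hr hmin huniq
    by_cases he : pvRankOf k = m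
    · have hk : k = k₀ := huniq k (by simp) he
      subst hk
      simp only [pvFm, he, if_pos hmc]
      rw [pv_fm_none l m (fun j hj => by have := hmin j (by simp [hj]); omega)]
      rfl
    · have hgt : m < pvRankOf k := lt_of_le_of_ne (hmin k (by simp)) (Ne.symm he)
      have hk₀l : k₀ ∈ l := by
        rcases List.mem_cons.mp hmem with h | h
        · exact absurd (h ▸ hr) (by omega)
        · exact h
      by_cases hc : pvRankOf k < c
      · simp only [pvFm, if_pos hc]
        rw [ih (pvRankOf k) m k₀ hgt hk₀l hr
            (fun j hj => hmin j (by simp [hj])) (fun j hj => huniq j (by simp [hj]))]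
        rfl
      · simp only [pvFm, if_neg hc]
        exact ih c m k₀ hmc hk₀l hr
          (fun j hj => hmin j (by simp [hj])) (fun j hj => huniq j (by simp [hj]))

theorem pv_rank_mk : pvRank = PySem.Dict.mk
    [("download_nq", 0), ("download_nquads", 1), ("download_trig", 2), ("download_nt", 3),
     ("download_n3", 4), ("download_ttl", 5), ("download_rdf", 6), ("download_rdfxml", 7),
     ("download_owl", 8), ("download_obo", 9), ("download_jsonld", 10), ("download_zip", 11),
     ("download_tar_gz", 12), ("download_tgz", 13), ("download_ftp", 14)] := by decide

theorem pv_rank_of_not_mem (k : String) (h : k ∉ pvPriority) : pvRankOf k = 15 := by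
  simp only [pvPriority, List.mem_cons, not_or] at h
  obtain ⟨h1, h2, h3, h4, h5, h6, h7, h8, h9, h10, h11, h12, h13, h14, h15, -⟩ := h
  simp [pvRankOf, pv_rank_mk, PySem.Dict.getD_eq_get?_getD,
    beq_iff_eq, Ne.symm h1, Ne.symm h2, Ne.symm h3, Ne.symm h4, Ne.symm h5, Ne.symm h6,
    Ne.symm h7, Ne.symm h8, Ne.symm h9, Ne.symm h10, Ne.symm h11, Ne.symm h12,
    Ne.symm h13, Ne.symm h14, Ne.symm h15, PySem.Dict.get?]

theorem pv_rank_mem : ∀ k ∈ pvPriority,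
    0 ≤ pvRankOf k ∧ pvRankOf k < 15 ∧ pvPriority.getD (pvRankOf k).toNat "" = k := by decide

theorem pv_rank_getElem : ∀ i : Fin 15, pvRankOf (pvPriority.getD i "") = (i : Int) := by decide


theorem pv_foldl_fst {β : Type} (g : β → String → β) :
    ∀ (l : List (String × String)) (st : β),
      l.foldl (fun st p => g st p.1) st = (l.map (·.1)).foldl g st := by
  intro l
  induction l with
  | nil => intro st; rfl
  | cons p l ih => intro st; simp [ih]

theorem pv_b_fold (entry : List (String × String)) :
    (entry.foldl
      (fun (st : Option String × Int) p =>
        if PySem.Str.startswith p.1 "download_" && pvTruthy (pvGet entry p.1) then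
          let r := pvRank.getD p.1 (pvPriority.length : Int)
          if r < st.2 then (some p.1, r) else st
        else st)
      ((none : Option String), (pvPriority.length : Int) + 1)).1
    = (pvFm ((entry.map (·.1)).filter
        (fun k => PySem.Str.startswith k "download_" && pvTruthy (pvGet entry k))) 16).elim none some := by
  show (entry.foldl
      (fun (st : Option String × Int) p =>
        if PySem.Str.startswith p.1 "download_" && pvTruthy (pvGet entry p.1) then pvStep st p.1 else st)
      ((none : Option String), (16 : Int))).1 = _
  have h1 : entry.foldl
      (fun (st : Option String × Int) p =>
        if PySem.Str.startswith p.1 "download_" && pvTruthy (pvGet entry p.1) then pvStep st p.1 else st)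
      ((none : Option String), (16 : Int))
      = (entry.map (·.1)).foldl
        (fun (st : Option String × Int) k =>
          if PySem.Str.startswith k "download_" && pvTruthy (pvGet entry k) then pvStep st k else st)
        ((none : Option String), (16 : Int)) :=
    pv_foldl_fst
      (fun (st : Option String × Int) k =>
        if PySem.Str.startswith k "download_" && pvTruthy (pvGet entry k) then pvStep st k else st)
      entry ((none : Option String), (16 : Int))
  rw [h1, pv_fold_filter (fun k => PySem.Str.startswith k "download_" && pvTruthy (pvGet entry k)) pvStep]
  exact pv_foldl_step_eq_fm _ none 16

-- ===== VERDICT (by name: the statement is the Claim_ definition above) =====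
theorem detect_data_format_spec : Claim_equal_detect_data_format := by
  intro entry _
  unfold Spec_detect_data_format detect_data_format detect_data_format_alt
  by_cases hg : pvTruthy (pvGet entry "local_tar_url") = true
  · simp [hg]
  · simp only [Bool.not_eq_true] at hg
    simp only [hg, Bool.false_eq_true, if_false]
    rw [pv_b_fold entry]
    set P : String → Bool :=
      fun k => PySem.Str.startswith k "download_" && pvTruthy (pvGet entry k) with hP
    set dl : List String := (entry.map (·.1)).filter P with hdl
    cases hfind : pvPriority.find? (fun k => dl.contains k) with
    | none =>
      have hnone : ∀ k ∈ dl, pvRankOf k = 15 := by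
        intro k hk
        apply pv_rank_of_not_mem
        intro hmem
        have := List.find?_eq_none.mp hfind k hmem
        simp at this
        exact this hk
      rw [pv_fm_head dl hnone]
      cases hdlc : dl with
      | nil => rfl
      | cons a t =>
        rw [show pvPriority.find? (fun k => dl.contains k)
              = List.find? (fun k => dl.contains k)
                ["download_nq", "download_nquads", "download_trig", "download_nt",
                 "download_n3", "download_ttl", "download_rdf", "download_rdfxml",
                 "download_owl", "download_obo", "download_jsonld", "download_zip",
                 "download_tar_gz", "download_tgz", "download_ftp"] from rfl] at hfind
        rw [hdlc] at hfind
        simp only [List.isEmpty_cons, Bool.false_eq_true, if_false]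
        rw [hfind]
        rfl
    | some k₀ =>
      obtain ⟨hpk₀, i, hi, hgetEq, hbefore⟩ := List.find?_eq_some_iff_getElem.mp hfind
      have hilt : i < 15 := by simpa [pvPriority] using hi
      have hk₀mem : k₀ ∈ dl := by simpa [List.contains_iff_mem] using hpk₀
      have hrk₀ : pvRankOf k₀ = (i : Int) := by
        have := pv_rank_getElem ⟨i, hilt⟩
        rwa [show pvPriority.getD (⟨i, hilt⟩ : Fin 15) "" = k₀ by
          rw [List.getD_eq_getElem?_getD]
          simp [List.getElem?_eq_getElem hi, hgetEq]] at this
      have hmin : ∀ k ∈ dl, (i : Int) ≤ pvRankOf k := by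
        intro k hk
        by_contra hlt
        rw [not_le] at hlt
        have hne15 : pvRankOf k ≠ 15 := by omega
        have hkpri : k ∈ pvPriority := by
          by_contra hnm
          exact hne15 (pv_rank_of_not_mem k hnm)
        obtain ⟨hr0, hr15, hrget⟩ := pv_rank_mem k hkpri
        have hj : (pvRankOf k).toNat < i := by omega
        have hb' : ∀ j, (hj : j < i) → ¬ (dl.contains (pvPriority.getD j "") = true) := by
          intro j hji
          have hjl : j < pvPriority.length := by omega
          simpa [List.getD_eq_getElem?_getD, List.getElem?_eq_getElem hjl] using hbefore j hji
        have hcontra := hb' (pvRankOf k).toNat hj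
        rw [hrget] at hcontra
        simp at hcontra
        exact hcontra hk
      have huniq : ∀ k ∈ dl, pvRankOf k = (i : Int) → k = k₀ := by
        intro k hk hr
        have hne15 : pvRankOf k ≠ 15 := by omega
        have hkpri : k ∈ pvPriority := by
          by_contra hnm
          exact hne15 (pv_rank_of_not_mem k hnm)
        obtain ⟨hr0, hr15, hrget⟩ := pv_rank_mem k hkpri
        rw [← hrget, hr]
        rw [← hgetEq, List.getD_eq_getElem?_getD]
        simp [List.getElem?_eq_getElem hi]
      rw [pv_fm_first_min dl 16 (i : Int) k₀ (by omega) hk₀mem hrk₀ hmin huniq]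
      have hdlne : dl.isEmpty = false := by
        cases hdlc : dl with
        | nil => rw [hdlc] at hk₀mem; cases hk₀mem
        | cons a t => rfl
      rw [show pvPriority.find? (fun k => dl.contains k)
            = List.find? (fun k => dl.contains k)
              ["download_nq", "download_nquads", "download_trig", "download_nt",
               "download_n3", "download_ttl", "download_rdf", "download_rdfxml",
               "download_owl", "download_obo", "download_jsonld", "download_zip",
               "download_tar_gz", "download_tgz", "download_ftp"] from rfl] at hfind
      rw [hdlne]
      simp only [Bool.false_eq_true, if_false]
      rw [hfind]
      rfl
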